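-- pv_equiv track=rewrite | github.com/QitaoXu/Lintcode | interviews/FUA/Python/runningTotal.py | canFirstWin
-- ===== SOURCE A (Python) =====
-- def canFirstWin(m, target):
--
--     running_total = 0
--
--     num_set = set([i for i in range(1, m + 1)])
--
--     for i in range(1, m + 1):
--
--         running_total += max(num_set)
--         num_set.remove(max(num_set))
--
--         if running_total >= target:
--             return True if i % 2 == 1 else False
--
--     return False
-- ===== SOURCE B (Python) =====
-- def canFirstWin(m, target):
--     total = 0
--     i = 0
--     for v in range(m, 0, -1):
--         total += v
--         i += 1
--         if total >= target:
--             return i % 2 == 1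
--     return False
-- ===== Notes on version B (the rewrite author's own statement) =====
-- stated objective: faster
-- what changed: B drops the set with its repeated max()+remove() scans and sums the values m, m-1, ... directly with a counting loop.
import Mathlib
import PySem

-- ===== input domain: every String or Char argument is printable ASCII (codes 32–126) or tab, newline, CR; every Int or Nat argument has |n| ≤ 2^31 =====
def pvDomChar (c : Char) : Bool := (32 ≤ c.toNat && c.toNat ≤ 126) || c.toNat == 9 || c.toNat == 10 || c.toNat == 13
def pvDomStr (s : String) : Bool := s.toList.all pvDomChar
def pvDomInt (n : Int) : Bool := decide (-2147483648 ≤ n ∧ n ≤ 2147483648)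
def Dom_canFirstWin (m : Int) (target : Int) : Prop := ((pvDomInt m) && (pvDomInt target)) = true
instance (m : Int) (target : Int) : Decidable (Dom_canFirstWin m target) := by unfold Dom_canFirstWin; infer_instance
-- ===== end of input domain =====

-- B replaces A's set with its repeated max()+remove() scans by a direct descending
-- counting loop over m, m-1, …, 1 (objective: faster).

-- ===== PORT A =====
-- the loop 'for i in …: running_total += max(num_set); num_set.remove(max(num_set)); if …'.
-- max(s) on the empty set would raise in Python; that state is unreachable here because the
-- set starts with exactly as many elements as the loop has iterations, so the 'none' branch
-- (and likewise remove?'s getD default) is never taken.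
def canFirstWinLoopA (target : Int) : List Int → Int → PySem.Set Int → Bool
  | [], _, _ => false
  | i :: rest, rt, s =>
    match PySem.List.max? s (fun x => x) with
    | none => false
    | some mx =>
      let rt' := rt + mx
      let s' := (PySem.Set.remove? s mx).getD s
      if rt' ≥ target then decide (PySem.Int.mod i 2 = 1) else canFirstWinLoopA target rest rt' s'

def canFirstWin (m : Int) (target : Int) : Bool :=
  let num_set : PySem.Set Int := PySem.Set.ofList ((PySem.List.pyRange 1 (m + 1) 1).map (fun i => i))
  canFirstWinLoopA target (PySem.List.pyRange 1 (m + 1) 1) 0 num_set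

-- ===== PORT B =====
-- the loop 'for v in range(m, 0, -1): total += v; i += 1; if total >= target: return i % 2 == 1'
def canFirstWinLoopB (target : Int) : List Int → Int → Int → Bool
  | [], _, _ => false
  | v :: rest, total, i =>
    let total' := total + v
    let i' := i + 1
    if total' ≥ target then decide (PySem.Int.mod i' 2 = 1) else canFirstWinLoopB target rest total' i'

def canFirstWin_alt (m : Int) (target : Int) : Bool :=
  canFirstWinLoopB target (PySem.List.pyRange m 0 (-1)) 0 0

-- ===== PRECONDITION & SPEC =====
def Spec_canFirstWin (m : Int) (target : Int) (out : Bool) : Prop := out = canFirstWin_alt m target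
instance (m : Int) (target : Int) (out : Bool) : Decidable (Spec_canFirstWin m target out) := by unfold Spec_canFirstWin; infer_instance

-- ===== CLAIM (what is proved, stated in full; the proofs are below) =====
def Claim_equal_canFirstWin : Prop := ∀ (m : Int) (target : Int), Dom_canFirstWin m target → Spec_canFirstWin m target (canFirstWin m target)

-- ===== LEMMAS AND PROOFS =====

-- folding Set.add over fresh distinct elements just appends them
theorem foldl_add_of_nodup (xs : List Int) : ∀ s : PySem.Set Int, xs.Nodup → (∀ x ∈ xs, x ∉ s) → xs.foldl PySem.Set.add s = s ++ xs := by
  induction xs with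
  | nil => intro s _ _; simp
  | cons x t ih =>
    intro s hnd hdisj
    simp only [List.foldl_cons]
    have hx : x ∉ s := hdisj x (by simp)
    have hadd : PySem.Set.add s x = s ++ [x] := by
      simp [PySem.Set.add, hx]
    rw [hadd, ih (s ++ [x]) hnd.of_cons]
    · simp
    · intro y hy
      simp only [List.mem_append, List.mem_singleton]
      rintro (h | rfl)
      · exact hdisj y (by simp [hy]) h
      · exact (List.nodup_cons.mp hnd).1 hy

-- set(xs) of a duplicate-free list is the list itself
theorem ofList_nodup_eq (xs : List Int) (h : xs.Nodup) : PySem.Set.ofList xs = xs := by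
  rw [PySem.Set.ofList_eq_foldl, foldl_add_of_nodup xs [] h (by simp)]
  simp

theorem foldl_max_pyRange (n : Nat) : ∀ (a c : Int),
    (PySem.List.pyRange a (a + n) 1).foldl max c = if n = 0 then c else max c (a + n - 1) := by
  induction n with
  | zero => intro a c; simp [PySem.List.pyRange_one_eq_nil (le_refl a)]
  | succ n ih =>
    intro a c
    have h2 : (a : Int) + (n + 1 : Nat) = (a + n) + 1 := by push_cast; ring
    rw [h2, PySem.List.pyRange_one_succ_right (by omega), List.foldl_append, ih]
    simp only [List.foldl_cons, List.foldl_nil]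
    by_cases hn : n = 0
    · simp [hn]
    · simp only [hn, if_false, Nat.succ_ne_zero]
      omega

-- max(set) of {1..k} is k
theorem max_pyRange_one (k : Nat) (hk : 1 ≤ k) :
    PySem.List.max? (PySem.List.pyRange 1 ((k : Int) + 1) 1) (fun x => x) = some (k : Int) := by
  rw [PySem.List.pyRange_one_cons (by omega), PySem.List.max?_id_cons]
  have h : PySem.List.pyRange (1+1) ((k : Int) + 1) 1 = PySem.List.pyRange (1+1) ((1+1) + ((k - 1 : Nat) : Int)) 1 := by
    congr 1; omega
  rw [h, foldl_max_pyRange]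
  by_cases h1 : k - 1 = 0
  · simp [h1]; omega
  · simp only [h1, if_false]
    congr 1
    omega

-- removing k from {1..k} leaves {1..k-1}
theorem set_remove_pyRange_one (k : Nat) (hk : 1 ≤ k) :
    PySem.Set.remove? (PySem.List.pyRange 1 ((k : Int) + 1) 1) (k : Int)
      = some (PySem.List.pyRange 1 (k : Int) 1) := by
  have hmem : (k : Int) ∈ PySem.List.pyRange 1 ((k : Int) + 1) 1 := by
    rw [PySem.List.mem_pyRange_one]; omega
  rw [PySem.Set.remove?_of_mem hmem]
  congr 1
  rw [PySem.List.pyRange_one_succ_right (by omega : (1:Int) ≤ k)]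
  simp only [PySem.Set.discard, List.filter_append]
  rw [List.filter_eq_self.mpr, List.filter_eq_nil_iff.mpr]
  · simp
  · intro a ha; simp at ha ⊢; omega
  · intro a ha; rw [PySem.List.mem_pyRange_one] at ha; simp; omega

-- invariant: with k values left in the set (= {1..k}) and k loop indices i0, i0+1, … left,
-- A's loop agrees with B's loop over k, k-1, …, 1 with counter i0-1
theorem loop_agree (k : Nat) : ∀ (i0 rt : Int) (target : Int),
    canFirstWinLoopA target (PySem.List.pyRange i0 (i0 + (k : Int)) 1) rt (PySem.List.pyRange 1 ((k : Int) + 1) 1)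
      = canFirstWinLoopB target (PySem.List.pyRange (k : Int) 0 (-1)) rt (i0 - 1) := by
  induction k with
  | zero =>
    intro i0 rt target
    rw [show (i0 + ((0:Nat):Int)) = i0 by push_cast; ring]
    rw [PySem.List.pyRange_one_eq_nil (le_refl i0), PySem.List.pyRange_neg_one_eq_nil (by norm_num)]
    rfl
  | succ k ih =>
    intro i0 rt target
    have hcons : PySem.List.pyRange i0 (i0 + ((k+1 : Nat) : Int)) 1
        = i0 :: PySem.List.pyRange (i0 + 1) (i0 + ((k+1 : Nat) : Int)) 1 :=
      PySem.List.pyRange_one_cons (by push_cast; omega)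
    have hconsB : PySem.List.pyRange ((k+1 : Nat) : Int) 0 (-1)
        = ((k+1 : Nat) : Int) :: PySem.List.pyRange (((k+1 : Nat) : Int) - 1) 0 (-1) :=
      PySem.List.pyRange_neg_one_cons (by push_cast; omega)
    rw [hcons, hconsB]
    show (match PySem.List.max? (PySem.List.pyRange 1 (((k+1:Nat):Int) + 1) 1) (fun x => x) with
      | none => false
      | some mx =>
        let rt' := rt + mx
        let s' := (PySem.Set.remove? (PySem.List.pyRange 1 (((k+1:Nat):Int) + 1) 1) mx).getD _
        if rt' ≥ target then decide (PySem.Int.mod i0 2 = 1) else canFirstWinLoopA target (PySem.List.pyRange (i0+1) (i0 + ((k+1:Nat):Int)) 1) rt' s') = _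
    rw [max_pyRange_one (k+1) (by omega)]
    simp only
    have hrm : PySem.Set.remove? (PySem.List.pyRange 1 (((k+1:Nat):Int) + 1) 1) ((k+1:Nat):Int)
        = some (PySem.List.pyRange 1 ((k+1:Nat):Int) 1) := set_remove_pyRange_one (k+1) (by omega)
    rw [hrm]
    show (if rt + ((k+1:Nat):Int) ≥ target then decide (PySem.Int.mod i0 2 = 1)
          else canFirstWinLoopA target (PySem.List.pyRange (i0+1) (i0 + ((k+1:Nat):Int)) 1) (rt + ((k+1:Nat):Int)) (PySem.List.pyRange 1 ((k+1:Nat):Int) 1)) = _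
    show _ = (if rt + ((k+1:Nat):Int) ≥ target then decide (PySem.Int.mod (i0 - 1 + 1) 2 = 1)
          else canFirstWinLoopB target (PySem.List.pyRange (((k+1:Nat):Int) - 1) 0 (-1)) (rt + ((k+1:Nat):Int)) (i0 - 1 + 1))
    rw [show i0 - 1 + 1 = i0 by ring]
    by_cases hge : rt + ((k+1:Nat):Int) ≥ target
    · rw [if_pos hge, if_pos hge]
    · rw [if_neg hge, if_neg hge]
      have h1 : (i0 : Int) + ((k+1:Nat):Int) = (i0 + 1) + (k : Int) := by push_cast; ring
      have h3 : ((k+1:Nat):Int) - 1 = (k : Int) := by push_cast; ring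
      have h4 : ((k+1:Nat):Int) = (k : Int) + 1 := by push_cast; ring
      rw [h1, h3]
      have := ih (i0 + 1) (rt + ((k+1:Nat):Int)) target
      rw [h4] at this
      rw [show i0 + 1 - 1 = i0 by ring] at this
      exact this

-- ===== VERDICT (by name: the statement is the Claim_ definition above) =====
theorem canFirstWin_spec : Claim_equal_canFirstWin := by
  intro m target _
  unfold Spec_canFirstWin canFirstWin canFirstWin_alt
  simp only [List.map_id_fun', id_eq, List.map_id'']
  by_cases hm : 1 ≤ m
  · have hk : m = ((m.toNat : Nat) : Int) := by omega
    rw [ofList_nodup_eq _ (PySem.List.nodup_pyRange_one 1 (m+1))]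
    have := loop_agree m.toNat 1 0 target
    rw [show (1 : Int) + (m.toNat : Int) = m + 1 by omega] at this
    rw [show ((m.toNat : Int) + 1) = m + 1 by omega] at this
    rw [show ((m.toNat : Int)) = m by omega] at this
    rw [this]
    norm_num
  · rw [PySem.List.pyRange_one_eq_nil (by omega : m + 1 ≤ 1),
        PySem.List.pyRange_neg_one_eq_nil (by omega : m ≤ 0)]
    rfl
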